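-- pv_equiv track=rewrite | github.com/MUHAMMADWAHAJASAD/System_health_detector | disk_scheduler.py | fcfs_disk_scheduling
-- ===== SOURCE A (Python) =====
-- def fcfs_disk_scheduling(requests, head):
--     seek_sequence = []
--     total_seek_time = 0
--     current = head
--
--     for req in requests:
--         seek_sequence.append(req)
--         total_seek_time += abs(req - current)
--         current = req
--
--     return seek_sequence, total_seek_time
-- ===== SOURCE B (Python) =====
-- def fcfs_disk_scheduling(requests, head):
--     # Divide and conquer: seek time of a segment = left half + boundary hop + right half.
--     reqs = list(requests)
--
--     def seg_total(lo, hi):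
--         # seek time incurred serving reqs[lo:hi] after arriving at reqs[lo]
--         if hi <= lo + 1:
--             return 0
--         mid = (lo + hi) // 2
--         return seg_total(lo, mid) + abs(reqs[mid] - reqs[mid - 1]) + seg_total(mid, hi)
--
--     total = seg_total(0, len(reqs))
--     if reqs:
--         total += abs(reqs[0] - head)
--     return reqs, total
-- ===== Notes on version B (the rewrite author's own statement) =====
-- stated objective: alternative
-- what changed: Replaced A's single left-to-right loop threading (sequence, running total, current position) by a divide-and-conquer reduction: the seek time of a segment is computed as left half + boundary hop |reqs[mid]-reqs[mid-1]| + right half, with the sequence returned as the materialized request list.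
import Mathlib
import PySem

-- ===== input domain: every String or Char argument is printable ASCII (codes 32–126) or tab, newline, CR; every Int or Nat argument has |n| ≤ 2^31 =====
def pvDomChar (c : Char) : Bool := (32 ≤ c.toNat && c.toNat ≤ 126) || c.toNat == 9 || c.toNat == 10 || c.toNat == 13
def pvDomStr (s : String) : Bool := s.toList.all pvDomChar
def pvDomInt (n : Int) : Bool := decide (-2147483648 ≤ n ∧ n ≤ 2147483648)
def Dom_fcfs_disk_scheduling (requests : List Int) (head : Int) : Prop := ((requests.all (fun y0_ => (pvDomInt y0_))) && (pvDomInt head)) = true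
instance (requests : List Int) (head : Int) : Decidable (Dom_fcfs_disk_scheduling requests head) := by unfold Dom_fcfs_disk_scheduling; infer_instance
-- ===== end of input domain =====

-- B replaces A's accumulator loop by a divide-and-conquer segment reduction; same O(n) cost, return value only.
-- ===== PORT A =====
-- Transliteration of A: one fold threading (seek_sequence, total_seek_time, current).
def fcfs_disk_scheduling (requests : List Int) (head : Int) : List Int × Int :=
  let st := requests.foldl
    (fun (s : List Int × Int × Int) req => (s.1 ++ [req], s.2.1 + |req - s.2.2|, req))
    ([], 0, head)
  (st.1, st.2.1)

-- ===== PORT B =====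
-- B's helper seg_total(lo, hi): seek time serving reqs[lo:hi] after arriving at reqs[lo].
-- Indices mid, mid-1 are in range in every call B makes (0 ≤ lo < mid < hi ≤ len); getD 0 is exact there.
-- fuel = hi - lo bounds the interval width, hence the recursion (totality guard only).
def fcfs_seg_total (reqs : List Int) : Nat → Nat → Nat → Int
  | 0, _, _ => 0
  | fuel + 1, lo, hi =>
    if hi ≤ lo + 1 then 0
    else
      fcfs_seg_total reqs fuel lo ((lo + hi) / 2)
        + |reqs.getD ((lo + hi) / 2) 0 - reqs.getD ((lo + hi) / 2 - 1) 0|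
        + fcfs_seg_total reqs fuel ((lo + hi) / 2) hi

def fcfs_disk_scheduling_alt (requests : List Int) (head : Int) : List Int × Int :=
  let total := fcfs_seg_total requests requests.length 0 requests.length
  match requests with
  | [] => (requests, total)
  | r :: _ => (requests, total + |r - head|)

-- ===== PRECONDITION & SPEC =====
def Spec_fcfs_disk_scheduling (requests : List Int) (head : Int) (out : List Int × Int) : Prop := out = fcfs_disk_scheduling_alt requests head
instance (requests : List Int) (head : Int) (out : List Int × Int) : Decidable (Spec_fcfs_disk_scheduling requests head out) := by unfold Spec_fcfs_disk_scheduling; infer_instance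

-- ===== CLAIM =====
def Claim_equal_fcfs_disk_scheduling : Prop := ∀ (requests : List Int) (head : Int), Dom_fcfs_disk_scheduling requests head → Spec_fcfs_disk_scheduling requests head (fcfs_disk_scheduling requests head)

-- ===== LEMMAS AND PROOFS =====
-- Sum of absolute differences of consecutive elements.
def adjSum : List Int → Int
  | a :: b :: t => |b - a| + adjSum (b :: t)
  | _ => 0

theorem adjSum_split (xs : List Int) (y z : Int) (zs : List Int) :
    adjSum (xs ++ y :: z :: zs) = adjSum (xs ++ [y]) + (|z - y| + adjSum (z :: zs)) := by
  induction xs with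
  | nil => simp [adjSum]
  | cons a rest ih =>
    cases rest with
    | nil => simp [adjSum]
    | cons b r2 =>
      simp only [List.cons_append, adjSum] at *
      rw [ih]; ring

theorem fcfs_seg_total_eq (reqs : List Int) : ∀ (k lo hi : Nat), hi - lo ≤ k → hi ≤ reqs.length →
    fcfs_seg_total reqs k lo hi = adjSum ((reqs.drop lo).take (hi - lo)) := by
  intro k
  induction k with
  | zero =>
    intro lo hi hk _
    have : hi - lo = 0 := by omega
    simp [fcfs_seg_total, this, adjSum]
  | succ n ih =>
    intro lo hi hk hlen
    rw [fcfs_seg_total]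
    by_cases hsmall : hi ≤ lo + 1
    · rw [if_pos hsmall]
      rcases Nat.lt_or_ge lo hi with h | h
      · have : hi - lo = 1 := by omega
        rw [this]
        cases reqs.drop lo with
        | nil => simp [adjSum]
        | cons a t => simp [adjSum]
      · have : hi - lo = 0 := by omega
        simp [this, adjSum]
    · rw [if_neg hsmall]
      set mid := (lo + hi) / 2 with hmid
      have h1 : lo + 1 ≤ mid := by omega
      have h2 : mid + 1 ≤ hi := by omega
      have hmlen : mid < reqs.length := by omega
      have hm1len : mid - 1 < reqs.length := by omega
      rw [ih lo mid (by omega) (by omega), ih mid hi (by omega) hlen]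
      -- decompose the big segment
      have hdropm : reqs.drop mid = reqs[mid] :: reqs.drop (mid + 1) :=
        List.drop_eq_getElem_cons hmlen
      have hdropm1 : reqs.drop (mid - 1) = reqs[mid - 1] :: reqs.drop mid := by
        have := List.drop_eq_getElem_cons hm1len
        rwa [show mid - 1 + 1 = mid by omega] at this
      have hsegR : (reqs.drop mid).take (hi - mid)
          = reqs[mid] :: (reqs.drop (mid + 1)).take (hi - mid - 1) := by
        rw [hdropm, show hi - mid = (hi - mid - 1) + 1 by omega, List.take_succ_cons,
          Nat.add_sub_cancel]
      have hsegL : (reqs.drop lo).take (mid - lo)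
          = (reqs.drop lo).take (mid - 1 - lo) ++ [reqs[mid - 1]] := by
        rw [show mid - lo = (mid - 1 - lo) + 1 by omega, List.take_add,
          List.drop_drop, show lo + (mid - 1 - lo) = mid - 1 by omega, hdropm1,
          List.take_succ_cons, List.take_zero]
      have hsegAll : (reqs.drop lo).take (hi - lo)
          = (reqs.drop lo).take (mid - 1 - lo)
              ++ reqs[mid - 1] :: reqs[mid] :: (reqs.drop (mid + 1)).take (hi - mid - 1) := by
        rw [show hi - lo = (mid - 1 - lo) + (hi - (mid - 1)) by omega, List.take_add,
          List.drop_drop, show lo + (mid - 1 - lo) = mid - 1 by omega, hdropm1,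
          show hi - (mid - 1) = (hi - mid) + 1 by omega, List.take_succ_cons, hsegR]
      rw [hsegAll, adjSum_split, hsegR, hsegL,
        List.getD_eq_getElem reqs 0 hmlen, List.getD_eq_getElem reqs 0 hm1len]
      ring

theorem fcfs_loop_eq (reqs : List Int) : ∀ (acc : List Int) (t cur : Int),
    reqs.foldl (fun (s : List Int × Int × Int) req => (s.1 ++ [req], s.2.1 + |req - s.2.2|, req))
      (acc, t, cur)
    = (acc ++ reqs, t + adjSum (cur :: reqs), reqs.getLastD cur) := by
  induction reqs with
  | nil => simp [adjSum]
  | cons r rs ih =>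
    intro acc t cur
    simp only [List.foldl, ih (acc ++ [r]) (t + |r - cur|) r, adjSum, Prod.mk.injEq]
    refine ⟨by simp, by ring, ?_⟩
    cases rs with
    | nil => simp
    | cons a l => simp [List.getLastD_eq_getLast?, List.getLast?_cons]

-- ===== VERDICT =====
theorem fcfs_disk_scheduling_spec : Claim_equal_fcfs_disk_scheduling := by
  intro requests head _
  unfold Spec_fcfs_disk_scheduling fcfs_disk_scheduling fcfs_disk_scheduling_alt
  simp only [fcfs_loop_eq, List.nil_append, zero_add]
  rw [fcfs_seg_total_eq requests requests.length 0 requests.length (by omega) (by omega)]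
  simp only [List.drop_zero, Nat.sub_zero, List.take_length]
  cases requests with
  | nil => simp [adjSum]
  | cons r t => simp only [adjSum]; ring_nf
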